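-- pv_equiv track=rewrite | github.com/MrBrantCode/unitest_baseline | mut_generate/mist_train_cf/cf_66326/solution.py | rot13_coder_decoder
-- ===== SOURCE A (Python) =====
-- def rot13_coder_decoder(string):
--     result = ""
--
--     for letter in string:
--         unicode = ord(letter)
--         if unicode >= ord('a') and unicode <= ord('z'):
--             if unicode > ord('m'):
--                 unicode -= 13
--             else:
--                 unicode += 13
--         elif unicode >= ord('A') and unicode <= ord('Z'):
--             if unicode > ord('M'):
--                 unicode -= 13
--             else:
--                 unicode += 13
--
--         result += chr(unicode)
--
--     return result
-- ===== SOURCE B (Python) =====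
-- def rot13_coder_decoder(string):
--     lower = "abcdefghijklmnopqrstuvwxyz"
--     upper = lower.upper()
--     table = str.maketrans(lower + upper,
--                           lower[13:] + lower[:13] + upper[13:] + upper[:13])
--     return string.translate(table)
-- ===== Notes on version B (the rewrite author's own statement) =====
-- stated objective: faster
-- what changed: Replaced the per-character range tests and +/-13 arithmetic with a precomputed str.maketrans translation table applied in one string.translate pass.
import Mathlib
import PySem

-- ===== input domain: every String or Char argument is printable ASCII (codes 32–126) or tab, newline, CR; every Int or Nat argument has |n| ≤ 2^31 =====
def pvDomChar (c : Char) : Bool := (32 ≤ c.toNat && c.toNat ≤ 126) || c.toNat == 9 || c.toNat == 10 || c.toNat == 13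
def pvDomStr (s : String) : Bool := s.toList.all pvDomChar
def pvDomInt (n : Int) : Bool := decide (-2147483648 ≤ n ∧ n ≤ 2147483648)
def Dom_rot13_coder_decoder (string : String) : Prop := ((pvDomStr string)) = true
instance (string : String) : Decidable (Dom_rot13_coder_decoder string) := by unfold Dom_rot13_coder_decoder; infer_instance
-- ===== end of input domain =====

-- B replaces A's per-character branch-and-arithmetic with a precomputed translation table (str.maketrans) applied via string.translate; objective: idiomatic.


-- ===== PORT A =====
def rot13_coder_decoder (string : String) : String :=
  String.mk (string.toList.foldl (fun result letter =>
    let unicode := letter.toNat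
    let unicode :=
      if unicode ≥ 97 ∧ unicode ≤ 122 then
        (if unicode > 109 then unicode - 13 else unicode + 13)
      else if unicode ≥ 65 ∧ unicode ≤ 90 then
        (if unicode > 77 then unicode - 13 else unicode + 13)
      else unicode
    result ++ [Char.ofNat unicode]) [])

-- ===== PORT B =====
-- setup: the translation table, a dict from code point to replacement char (str.maketrans)
def pvRotTable : List (Nat × Char) :=
  let lower := "abcdefghijklmnopqrstuvwxyz".toList
  let upper := (PySem.Str.upper "abcdefghijklmnopqrstuvwxyz").toList
  List.zip ((lower ++ upper).map Char.toNat)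
           ((lower.drop 13 ++ lower.take 13) ++ (upper.drop 13 ++ upper.take 13))

-- string.translate: table lookup per character, absent keys pass through
def pvTranslate (c : Char) : Char :=
  match pvRotTable.find? (fun p => p.1 == c.toNat) with
  | some p => p.2
  | none => c

def rot13_coder_decoder_alt (string : String) : String :=
  String.mk (string.toList.map pvTranslate)

-- ===== PRECONDITION & SPEC =====
def Spec_rot13_coder_decoder (string : String) (out : String) : Prop := out = rot13_coder_decoder_alt string
instance (string : String) (out : String) : Decidable (Spec_rot13_coder_decoder string out) := by unfold Spec_rot13_coder_decoder; infer_instance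

-- ===== CLAIM (what is proved, stated in full; the proofs are below) =====
def Claim_equal_rot13_coder_decoder : Prop := ∀ (string : String), Dom_rot13_coder_decoder string → Spec_rot13_coder_decoder string (rot13_coder_decoder string)

-- ===== LEMMAS AND PROOFS =====

def pvArith (n : Nat) : Nat :=
  if n ≥ 97 ∧ n ≤ 122 then (if n > 109 then n - 13 else n + 13)
  else if n ≥ 65 ∧ n ≤ 90 then (if n > 77 then n - 13 else n + 13)
  else n

set_option maxRecDepth 4000 in
lemma pvTable_key : ∀ n : Nat, n < 128 →
    ((pvRotTable.find? (fun p => p.1 == n)).map Prod.snd).getD (Char.ofNat n)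
      = Char.ofNat (pvArith n) := by decide

lemma pv_step (c : Char) (h : c.toNat < 128) :
    pvTranslate c = Char.ofNat (pvArith c.toNat) := by
  have hk := pvTable_key c.toNat h
  unfold pvTranslate
  rw [show Char.ofNat c.toNat = c from Char.ofNat_toNat c] at hk
  cases hfind : pvRotTable.find? (fun p => p.1 == c.toNat) with
  | none => simpa [hfind] using hk
  | some p => simpa [hfind] using hk

lemma pv_foldl (l : List Char) (acc : List Char) :
    (l.foldl (fun result letter =>
      let unicode := letter.toNat
      let unicode :=
        if unicode ≥ 97 ∧ unicode ≤ 122 then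
          (if unicode > 109 then unicode - 13 else unicode + 13)
        else if unicode ≥ 65 ∧ unicode ≤ 90 then
          (if unicode > 77 then unicode - 13 else unicode + 13)
        else unicode
      result ++ [Char.ofNat unicode]) acc)
      = acc ++ l.map (fun c => Char.ofNat (pvArith c.toNat)) := by
  induction l generalizing acc with
  | nil => simp
  | cons c l ih => simp [List.foldl, ih, pvArith]

-- ===== VERDICT (by name: the statement is the Claim_ definition above) =====
theorem rot13_coder_decoder_spec : Claim_equal_rot13_coder_decoder := by
  intro s hdom
  unfold Spec_rot13_coder_decoder rot13_coder_decoder rot13_coder_decoder_alt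
  rw [pv_foldl]
  congr 1
  apply List.map_congr_left
  intro c hc
  have hd : pvDomChar c = true := by
    have := (List.all_eq_true.mp hdom) c hc
    simpa using this
  have hlt : c.toNat < 128 := by
    simp [pvDomChar] at hd; omega
  exact (pv_step c hlt).symm
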